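-- pv_equiv track=rewrite | github.com/Amar-Sri-MS/FunTools | ApiSummarizer/process_api_summary.py | _filter_prototypes
-- ===== SOURCE A (Python) =====
-- from typing import Iterable, Any, List, Optional, Union, Callable, TextIO, Dict, Tuple
--
-- def _filter_prototypes(
--     raw_input: Dict[str, List[str]], proto: List[str]
-- ) -> Dict[str, List[str]]:
--     """Filter prototypes from raw input
--
--     Parameters
--     ----------
--     raw_input : Dict[str, List[str]]
--         raw input
--     proto : List[str]
--         function prototype list
--
--     Returns
--     -------
--     Dict[str, List[str]]
--         filtered prototypes
--
--     """
--
--     out_dict = {}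
--
--     def _if_in_prototype(line: str) -> bool:
--         for p in proto:
--             if line in p:
--                 return True
--         return False
--
--     def _filter_incomplete_lines(line: str) -> bool:
--         if line.startswith("struct") and "(" not in line:
--             return True
--         if line.startswith("enum") and "(" not in line:
--             return True
--         if "(" not in line:
--             return True
--         return False
--
--     for name, prototypes in raw_input.items():
--         if prototypes is None:
--             continue
--         out_dict[name] = []
--         for p in prototypes:
--
--             if not _if_in_prototype(p) or _filter_incomplete_lines(p):
--                 continue
--             out_dict[name].append(p)
--
--     return out_dict
-- ===== SOURCE B (Python) =====
-- def _filter_prototypes(raw_input, proto):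
--     # Stage 1: build an index of the DISTINCT complete candidate lines once.
--     candidates = set()
--     for lines in raw_input.values():
--         for l in lines:
--             if "(" in l:
--                 candidates.add(l)
--     # Stage 2: one proto-major sweep; each proto entry marks every candidate
--     # it contains (loop nesting inverted w.r.t. a per-line scan of proto).
--     matched = set()
--     for q in proto:
--         for l in candidates:
--             if l in q:
--                 matched.add(l)
--     # Stage 3: rebuild the dict keeping exactly the matched lines.
--     return {name: [l for l in lines if l in matched]
--             for name, lines in raw_input.items()}
-- ===== Notes on version B (the rewrite author's own statement) =====
-- stated objective: faster
-- what changed: B inverts the loop nesting and stages the work: it dedups the complete candidate lines into a set once, sweeps proto once proto-major marking in a 'matched' set every candidate some entry contains, and finally rebuilds the dict by set membership - so A's per-line-occurrence inner scan of proto (and its redundant struct/enum branches) disappears and each DISTINCT line is matched once instead of once per occurrence.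
import Mathlib
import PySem

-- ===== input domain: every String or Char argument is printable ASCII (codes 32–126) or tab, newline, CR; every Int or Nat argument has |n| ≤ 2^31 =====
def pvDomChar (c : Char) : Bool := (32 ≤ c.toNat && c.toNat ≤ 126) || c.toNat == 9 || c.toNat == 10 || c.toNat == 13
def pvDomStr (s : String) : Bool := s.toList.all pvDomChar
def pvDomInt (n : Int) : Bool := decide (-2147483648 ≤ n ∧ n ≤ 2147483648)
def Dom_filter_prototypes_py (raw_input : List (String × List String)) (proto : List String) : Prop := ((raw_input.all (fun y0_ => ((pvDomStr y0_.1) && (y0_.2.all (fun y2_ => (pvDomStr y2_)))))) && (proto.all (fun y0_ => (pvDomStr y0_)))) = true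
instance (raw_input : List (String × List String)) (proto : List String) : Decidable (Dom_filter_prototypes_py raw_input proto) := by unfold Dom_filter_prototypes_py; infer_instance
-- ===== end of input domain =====

-- B stages the work differently: dedup the complete candidate lines into a set once, sweep
-- proto once proto-major marking matched candidates, then rebuild by set membership (same result).

-- ===== PORT A =====
-- helper `_if_in_prototype`: 'for p in proto: if line in p: return True / return False'
def pvIfInPrototype (proto : List String) (line : String) : Bool :=
  proto.any (fun p => PySem.Str.isIn line p)

-- helper `_filter_incomplete_lines`, branch for branch
def pvFilterIncompleteLines (line : String) : Bool :=
  if PySem.Str.startswith line "struct" && !(PySem.Str.isIn "(" line) then true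
  else if PySem.Str.startswith line "enum" && !(PySem.Str.isIn "(" line) then true
  else if !(PySem.Str.isIn "(" line) then true
  else false

-- main loop; `if prototypes is None: continue` can never fire (values are lists, never None)
def filter_prototypes_py (raw_input : List (String × List String)) (proto : List String) : List (String × List String) :=
  (raw_input.foldl (fun out_dict nv =>
      let out1 := out_dict.insert nv.1 []                  -- out_dict[name] = []
      nv.2.foldl (fun o p =>
          if !(pvIfInPrototype proto p) || pvFilterIncompleteLines p then o
          else o.modify nv.1 [] (fun l => l ++ [p]))       -- out_dict[name].append(p)
        out1)
    (PySem.Dict.empty : PySem.Dict String (List String))).items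

-- ===== PORT B =====
-- stage 1: 'for lines in raw_input.values(): for l in lines: if "(" in l: candidates.add(l)'
def pvCandidates (raw_input : List (String × List String)) : PySem.Set String :=
  raw_input.foldl (fun c nv =>
      nv.2.foldl (fun c l => if PySem.Str.isIn "(" l then PySem.Set.add c l else c) c)
    PySem.Set.empty

-- stage 2: 'for q in proto: for l in candidates: if l in q: matched.add(l)'
-- (iterates the candidate set; the resulting SET does not depend on that iteration order)
def pvMatched (cand : PySem.Set String) (proto : List String) : PySem.Set String :=
  proto.foldl (fun m q =>
      cand.foldl (fun m l => if PySem.Str.isIn l q then PySem.Set.add m l else m) m)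
    PySem.Set.empty

-- stage 3: the dict comprehension
def filter_prototypes_py_alt (raw_input : List (String × List String)) (proto : List String) : List (String × List String) :=
  let matched := pvMatched (pvCandidates raw_input) proto
  (raw_input.foldl (fun d nv =>
      d.insert nv.1 (nv.2.filter (fun l => PySem.Set.contains matched l)))
    (PySem.Dict.empty : PySem.Dict String (List String))).items

-- ===== PRECONDITION & SPEC =====
def Spec_filter_prototypes_py (raw_input : List (String × List String)) (proto : List String) (out : List (String × List String)) : Prop := out = filter_prototypes_py_alt raw_input proto
instance (raw_input : List (String × List String)) (proto : List String) (out : List (String × List String)) : Decidable (Spec_filter_prototypes_py raw_input proto out) := by unfold Spec_filter_prototypes_py; infer_instance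

-- ===== CLAIM (what is proved, stated in full; the proofs are below) =====
def Claim_equal_filter_prototypes_py : Prop := ∀ (raw_input : List (String × List String)) (proto : List String), Dom_filter_prototypes_py raw_input proto → Spec_filter_prototypes_py raw_input proto (filter_prototypes_py raw_input proto)

-- ===== LEMMAS AND PROOFS =====

-- membership in a 'for x in l: if p x: s.add(x)' loop
lemma mem_foldl_add_if {α : Type} [BEq α] [LawfulBEq α] (p : α → Bool) (l : List α)
    (s : PySem.Set α) (y : α) :
    (y ∈ l.foldl (fun s x => if p x then PySem.Set.add s x else s) s)
      ↔ y ∈ s ∨ (y ∈ l ∧ p y = true) := by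
  induction l generalizing s with
  | nil => simp
  | cons x t ih =>
    simp only [List.foldl_cons, ih, List.mem_cons]
    by_cases hx : p x = true
    · simp only [hx, if_true, PySem.Set.mem_add]
      constructor
      · rintro ((h | rfl) | h)
        · exact Or.inl h
        · exact Or.inr ⟨Or.inl rfl, hx⟩
        · exact Or.inr ⟨Or.inr h.1, h.2⟩
      · rintro (h | ⟨(rfl | h), hp⟩)
        · exact Or.inl (Or.inl h)
        · exact Or.inl (Or.inr rfl)
        · exact Or.inr ⟨h, hp⟩
    · simp only [hx]
      constructor
      · rintro (h | h)
        · exact Or.inl h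
        · exact Or.inr ⟨Or.inr h.1, h.2⟩
      · rintro (h | ⟨(rfl | h), hp⟩)
        · exact Or.inl h
        · exact absurd hp hx
        · exact Or.inr ⟨h, hp⟩

-- stage 1 collects exactly the complete lines occurring among the values
lemma mem_candidates (raw : List (String × List String)) (y : String) :
    y ∈ pvCandidates raw ↔ (∃ nv ∈ raw, y ∈ nv.2) ∧ PySem.Str.isIn "(" y = true := by
  unfold pvCandidates
  suffices h : ∀ (c : PySem.Set String),
      (y ∈ raw.foldl (fun c nv =>
          nv.2.foldl (fun c l => if PySem.Str.isIn "(" l then PySem.Set.add c l else c) c) c)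
        ↔ y ∈ c ∨ ((∃ nv ∈ raw, y ∈ nv.2) ∧ PySem.Str.isIn "(" y = true) by
    rw [h PySem.Set.empty]; simp [PySem.Set.empty]
  intro c
  induction raw generalizing c with
  | nil => simp
  | cons nv t ih =>
    simp only [List.foldl_cons, ih, mem_foldl_add_if, List.mem_cons]
    constructor
    · rintro ((h | h) | h)
      · exact Or.inl h
      · exact Or.inr ⟨⟨nv, Or.inl rfl, h.1⟩, h.2⟩
      · obtain ⟨⟨w, hw, hyw⟩, hp⟩ := h
        exact Or.inr ⟨⟨w, Or.inr hw, hyw⟩, hp⟩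
    · rintro (h | ⟨⟨w, (rfl | hw), hyw⟩, hp⟩)
      · exact Or.inl (Or.inl h)
      · exact Or.inl (Or.inr ⟨hyw, hp⟩)
      · exact Or.inr ⟨⟨w, hw, hyw⟩, hp⟩

-- stage 2 marks exactly the candidates contained in some proto entry
lemma mem_matched (cand : PySem.Set String) (proto : List String) (y : String) :
    y ∈ pvMatched cand proto ↔ y ∈ cand ∧ ∃ q ∈ proto, PySem.Str.isIn y q = true := by
  unfold pvMatched
  suffices h : ∀ (m : PySem.Set String),
      (y ∈ proto.foldl (fun m q =>
          cand.foldl (fun m l => if PySem.Str.isIn l q then PySem.Set.add m l else m) m) m)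
        ↔ y ∈ m ∨ (y ∈ cand ∧ ∃ q ∈ proto, PySem.Str.isIn y q = true) by
    rw [h PySem.Set.empty]; simp [PySem.Set.empty]
  intro m
  induction proto generalizing m with
  | nil => simp
  | cons q t ih =>
    simp only [List.foldl_cons, ih, mem_foldl_add_if, List.mem_cons]
    constructor
    · rintro ((h | h) | h)
      · exact Or.inl h
      · exact Or.inr ⟨h.1, q, Or.inl rfl, h.2⟩
      · obtain ⟨hc, w, hw, hiw⟩ := h
        exact Or.inr ⟨hc, w, Or.inr hw, hiw⟩
    · rintro (h | ⟨hc, w, (rfl | hw), hiw⟩)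
      · exact Or.inl (Or.inl h)
      · exact Or.inl (Or.inr ⟨hc, hiw⟩)
      · exact Or.inr ⟨hc, w, hw, hiw⟩

-- `_filter_incomplete_lines` is just '"(" not in line'
lemma filter_incomplete_eq (line : String) :
    pvFilterIncompleteLines line = !(PySem.Str.isIn "(" line) := by
  unfold pvFilterIncompleteLines
  cases h : PySem.Str.isIn "(" line <;>
    cases PySem.Str.startswith line "struct" <;>
      cases PySem.Str.startswith line "enum" <;> simp

-- per line of a value list: A's keep-test equals membership in B's matched set
lemma keep_eq {raw : List (String × List String)} {proto : List String} {nv : String × List String}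
    (hnv : nv ∈ raw) {l : String} (hl : l ∈ nv.2) :
    (pvIfInPrototype proto l && !(pvFilterIncompleteLines l))
      = PySem.Set.contains (pvMatched (pvCandidates raw) proto) l := by
  rw [Bool.eq_iff_iff, PySem.Set.contains_iff, mem_matched, mem_candidates,
    filter_incomplete_eq]
  unfold pvIfInPrototype
  simp only [Bool.and_eq_true, Bool.not_not, List.any_eq_true]
  constructor
  · rintro ⟨⟨q, hq, hin⟩, hpar⟩
    exact ⟨⟨⟨nv, hnv, hl⟩, hpar⟩, q, hq, hin⟩
  · rintro ⟨⟨_, hpar⟩, q, hq, hin⟩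
    exact ⟨⟨q, hq, hin⟩, hpar⟩

-- inserting twice at the same key keeps the position and only the second value
lemma dict_insert_insert {ν : Type} (d : PySem.Dict String ν) (k : String) (v w : ν) :
    (d.insert k v).insert k w = d.insert k w := by
  unfold PySem.Dict.insert PySem.Dict.contains
  cases hc : d.items.any (fun p => p.1 == k) with
  | true =>
    simp only [if_true]
    have h2 : (List.map (fun p => if p.1 == k then (k, v) else p) d.items).any (fun p => p.1 == k) = true := by
      obtain ⟨p, hp, hpk⟩ := List.any_eq_true.mp hc
      exact List.any_eq_true.mpr ⟨_, List.mem_map_of_mem hp, by simp [hpk]⟩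
    simp only [h2, if_true, List.map_map]
    congr 1
    apply List.map_congr_left
    intro p _
    by_cases hp : p.1 = k
    · simp [hp]
    · simp [hp]
  | false =>
    simp only [Bool.false_eq_true, if_false]
    have h3 : ∀ p ∈ d.items, ¬ p.1 = k := by
      intro p hp hpk
      have := (List.any_eq_false.mp hc) p hp
      simp [hpk] at this
    have h2 : ((d.items ++ [(k, v)]).any (fun p => p.1 == k)) = true := by simp
    have h4 : List.map (fun p => if p.1 == k then (k, w) else p) d.items = d.items := by
      have heq : List.map (fun p : String × ν => if p.1 == k then (k, w) else p) d.items
          = List.map id d.items := List.map_congr_left (fun p hp => by simp [h3 p hp])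
      simpa using heq
    simp only [h2, if_true, List.map_append, h4, List.map_cons, List.map_nil]
    congr 2
    simp

-- A's inner append loop, started right after `out_dict[name] = []`, builds the filtered list
lemma inner_loop_eq {proto : List String} (ps : List String) (d : PySem.Dict String (List String))
    (k : String) (acc : List String) :
    ps.foldl (fun o p =>
        if !(pvIfInPrototype proto p) || pvFilterIncompleteLines p then o
        else o.modify k [] (fun l => l ++ [p])) (d.insert k acc)
      = d.insert k (acc ++ ps.filter (fun p => pvIfInPrototype proto p && !(pvFilterIncompleteLines p))) := by
  induction ps generalizing acc with
  | nil => simp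
  | cons p t ih =>
    simp only [List.foldl_cons, List.filter_cons]
    by_cases hk : (pvIfInPrototype proto p && !(pvFilterIncompleteLines p)) = true
    · have hskip : (!(pvIfInPrototype proto p) || pvFilterIncompleteLines p) = false := by
        cases h1 : pvIfInPrototype proto p <;> cases h2 : pvFilterIncompleteLines p <;> simp_all
      rw [hskip]
      simp only [Bool.false_eq_true, if_false, hk, if_true]
      rw [PySem.Dict.modify, PySem.Dict.getD_insert_self, dict_insert_insert, ih]
      simp
    · have hskip : (!(pvIfInPrototype proto p) || pvFilterIncompleteLines p) = true := by
        cases h1 : pvIfInPrototype proto p <;> cases h2 : pvFilterIncompleteLines p <;> simp_all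
      rw [hskip]
      simp only [if_true]
      rw [ih]
      have : (if (pvIfInPrototype proto p && !pvFilterIncompleteLines p) = true
          then p :: List.filter (fun p => pvIfInPrototype proto p && !pvFilterIncompleteLines p) t
          else List.filter (fun p => pvIfInPrototype proto p && !pvFilterIncompleteLines p) t)
          = List.filter (fun p => pvIfInPrototype proto p && !pvFilterIncompleteLines p) t := by
        simp [hk]
      rw [this]

-- ===== VERDICT (by name: the statement is the Claim_ definition above) =====
theorem filter_prototypes_py_spec : Claim_equal_filter_prototypes_py := by
  intro raw proto _hdom
  unfold Spec_filter_prototypes_py filter_prototypes_py filter_prototypes_py_alt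
  congr 1
  apply PySem.List.foldl_congr_mem
  intro acc nv hmem
  rw [show acc.insert nv.1 [] = acc.insert nv.1 [] from rfl]
  rw [inner_loop_eq nv.2 acc nv.1 []]
  rw [List.nil_append]
  congr 1
  apply List.filter_congr
  intro p hp
  exact keep_eq hmem hp
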